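-- pv_equiv track=rewrite | github.com/kolonialno/adventofcode | archive/2022/andehen/21/21.py | get_equation
-- ===== SOURCE A (Python) =====
-- def get_equation(monkeys: dict, monkey: str) -> str:
--
--     if monkey == "humn":
--         return "x"
--
--     match monkeys[monkey].split():
--         case [value]:
--             return value
--         case [monkey_1, op, monkey_2]:
--             return f"({get_equation(monkeys, monkey_1)} {op} {get_equation(monkeys, monkey_2)})"
--         case _:
--             raise Exception("wtf %s", monkey)
-- ===== SOURCE B (Python) =====
-- def get_equation(monkeys: dict, monkey: str) -> str:
--     # Iterative post-order traversal with an explicit work stack and a dict of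
--     # completed subexpression strings, instead of call recursion.
--     done = {}
--     stack = [(monkey, False)]
--     while stack:
--         name, ready = stack.pop()
--         if ready:
--             parts = monkeys[name].split()
--             done[name] = f"({done[parts[0]]} {parts[1]} {done[parts[2]]})"
--         elif name == "humn":
--             done[name] = "x"
--         else:
--             parts = monkeys[name].split()
--             if len(parts) == 1:
--                 done[name] = parts[0]
--             elif len(parts) == 3:
--                 stack.append((name, True))
--                 stack.append((parts[2], False))
--                 stack.append((parts[0], False))
--             else:
--                 raise Exception("wtf %s", name)
--     return done[monkey]
-- ===== Notes on version B (the rewrite author's own statement) =====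
-- stated objective: alternative
-- what changed: Replaced the call-recursive tree walk by an iterative post-order traversal with an explicit work stack and a dict of completed subexpression strings.
import Mathlib
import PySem

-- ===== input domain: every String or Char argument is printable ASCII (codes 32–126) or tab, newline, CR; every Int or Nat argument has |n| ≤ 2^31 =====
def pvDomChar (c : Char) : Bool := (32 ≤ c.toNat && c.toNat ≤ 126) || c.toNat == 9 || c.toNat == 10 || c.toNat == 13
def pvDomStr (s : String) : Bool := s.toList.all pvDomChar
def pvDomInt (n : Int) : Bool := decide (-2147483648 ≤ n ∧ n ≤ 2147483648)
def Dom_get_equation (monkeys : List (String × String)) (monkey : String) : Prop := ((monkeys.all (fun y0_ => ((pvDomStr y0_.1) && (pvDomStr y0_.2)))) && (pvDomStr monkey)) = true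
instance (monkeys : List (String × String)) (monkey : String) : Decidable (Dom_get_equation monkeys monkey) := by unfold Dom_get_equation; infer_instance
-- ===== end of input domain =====

-- B replaces A's call recursion by an explicit work stack with a dict of finished
-- subexpression strings (alternative decomposition, same cost); equivalence is
-- about the return value on inputs where A's recursion terminates without raising.

-- ===== PORT A =====
-- Fuel-indexed transliteration of A's recursion (fuel only makes it total: on any
-- input where the Python returns, the call depth is ≤ monkeys.length + 1, so the
-- fuel is never the reason a branch is taken); none = the Python raises.
def evalA (monkeys : List (String × String)) : Nat → String → Option String
  | 0, _ => none
  | fuel+1, monkey =>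
    if monkey = "humn" then some "x" else
    match (PySem.Dict.ofList monkeys).get? monkey with
    | none => none
    | some v =>
      match PySem.Str.split₀ v with
      | [value] => some value
      | [m1, op, m2] =>
        match evalA monkeys fuel m1, evalA monkeys fuel m2 with
        | some l, some r => some ("(" ++ l ++ " " ++ op ++ " " ++ r ++ ")")
        | _, _ => none
      | _ => none

def get_equation (monkeys : List (String × String)) (monkey : String) : String :=
  (evalA monkeys (monkeys.length + 1) monkey).getD ""

-- ===== PORT B =====
-- Transliteration of Source B's while loop over the explicit stack; the fuel bounds
-- the number of loop iterations (≤ twice the expression-tree size) and only makes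
-- the loop total; none = the Python raises (or, on a cyclic graph, loops forever).
def runB (monkeys : List (String × String)) :
    Nat → List (String × Bool) → PySem.Dict String String → Option (PySem.Dict String String)
  | 0, _, _ => none
  | _+1, [], done => some done
  | fuel+1, (name, ready) :: rest, done =>
    if ready then
      match (PySem.Dict.ofList monkeys).get? name with
      | none => none
      | some v =>
        match PySem.Str.split₀ v with
        | [m1, op, m2] =>
          match done.get? m1, done.get? m2 with
          | some l, some r =>
            runB monkeys fuel rest (done.insert name ("(" ++ l ++ " " ++ op ++ " " ++ r ++ ")"))
          | _, _ => none
        | _ => none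
    else if name = "humn" then runB monkeys fuel rest (done.insert name "x")
    else
      match (PySem.Dict.ofList monkeys).get? name with
      | none => none
      | some v =>
        match PySem.Str.split₀ v with
        | [value] => runB monkeys fuel rest (done.insert name value)
        | [m1, _, m2] =>
          runB monkeys fuel ((m1, false) :: (m2, false) :: (name, true) :: rest) done
        | _ => none

def get_equation_alt (monkeys : List (String × String)) (monkey : String) : String :=
  match runB monkeys (2 * 3 ^ (monkeys.length + 2) + 1) [(monkey, false)] PySem.Dict.empty with
  | some done => (done.get? monkey).getD ""
  | none => ""

-- ===== PRECONDITION & SPEC =====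
-- Pre_ = the reference graph is well formed from `monkey`: every name reached is
-- "humn", a 1-token value, or a 3-token expression over present names, and the
-- reference chains are acyclic.  Termination of a recursive definition over input
-- data has no iteration-free decidable statement; `wellFormedUpTo` is the standard
-- bounded-depth one (depth monkeys.length + 1 bounds every acyclic chain, since a
-- repeated key would be a cycle).  It decides graph shape only — no strings are
-- built — and exactly on these inputs Python A returns; outside it raises
-- KeyError, the explicit Exception, or RecursionError (on a cycle).
def wellFormedUpTo (monkeys : List (String × String)) : Nat → String → Bool
  | 0, _ => false
  | fuel+1, monkey =>
    if monkey = "humn" then true else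
    match (PySem.Dict.ofList monkeys).get? monkey with
    | none => false
    | some v =>
      match PySem.Str.split₀ v with
      | [_] => true
      | [m1, _, m2] => wellFormedUpTo monkeys fuel m1 && wellFormedUpTo monkeys fuel m2
      | _ => false

def Pre_get_equation (monkeys : List (String × String)) (monkey : String) : Prop :=
  wellFormedUpTo monkeys (monkeys.length + 1) monkey = true

instance (monkeys : List (String × String)) (monkey : String) :
    Decidable (Pre_get_equation monkeys monkey) := by unfold Pre_get_equation; infer_instance

def pvWitness_get_equation : (List (String × String)) × String :=
  ([("root", "a + b"), ("a", "1"), ("b", "humn * c"), ("c", "3")], "root")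

def Spec_get_equation (monkeys : List (String × String)) (monkey : String) (out : String) : Prop :=
  out = get_equation_alt monkeys monkey
instance (monkeys : List (String × String)) (monkey : String) (out : String) :
    Decidable (Spec_get_equation monkeys monkey out) := by unfold Spec_get_equation; infer_instance

-- ===== CLAIM (what is proved, stated in full; the proofs are below) =====
def Claim_equal_get_equation : Prop :=
  ∀ (monkeys : List (String × String)) (monkey : String),
    Dom_get_equation monkeys monkey → Pre_get_equation monkeys monkey →
      Spec_get_equation monkeys monkey (get_equation monkeys monkey)

-- ===== LEMMAS AND PROOFS =====

theorem evalA_mono (monkeys : List (String × String)) (n m : Nat) :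
    ∀ (name : String) (s : String), evalA monkeys n name = some s →
      evalA monkeys (n + m) name = some s := by
  induction n with
  | zero => intro name s h; simp [evalA] at h
  | succ n ih =>
    intro name s h
    rw [show n + 1 + m = (n + m) + 1 from by omega]
    simp only [evalA] at h ⊢
    split at h
    · rename_i hn; rw [if_pos hn]; exact h
    · rename_i hn
      rw [if_neg hn]
      split at h
      · cases h
      · split at h
        · exact h
        · rename_i m1 op m2 hs
          split at h
          · rename_i l r h1 h2
            rw [ih m1 l h1, ih m2 r h2]; exact h
          · cases h
        · cases h

theorem evalA_det (monkeys : List (String × String)) {n n' : Nat} {name s s' : String}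
    (h : evalA monkeys n name = some s) (h' : evalA monkeys n' name = some s') : s = s' := by
  have h1 := evalA_mono monkeys n n' name s h
  have h2 := evalA_mono monkeys n' n name s' h'
  rw [Nat.add_comm n' n] at h2
  rw [h1] at h2; exact Option.some_inj.mp h2

theorem wellFormedUpTo_evalA (monkeys : List (String × String)) (n : Nat) :
    ∀ (name : String), wellFormedUpTo monkeys n name = true → ∃ s, evalA monkeys n name = some s := by
  induction n with
  | zero => intro name h; simp [wellFormedUpTo] at h
  | succ n ih =>
    intro name h
    simp only [wellFormedUpTo] at h
    simp only [evalA]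
    split at h
    · rename_i hn; exact ⟨"x", by rw [if_pos hn]⟩
    · rename_i hn
      rw [if_neg hn]
      split at h
      · cases h
      · split at h
        · rename_i value hs; exact ⟨value, rfl⟩
        · rename_i m1 op m2 hs
          rw [Bool.and_eq_true] at h
          obtain ⟨s1, h1⟩ := ih m1 h.1
          obtain ⟨s2, h2⟩ := ih m2 h.2
          exact ⟨"(" ++ s1 ++ " " ++ op ++ " " ++ s2 ++ ")", by simp only [h1, h2]⟩
        · cases h

theorem runB_mono (monkeys : List (String × String)) (f m : Nat) :
    ∀ (st : List (String × Bool)) (d r : PySem.Dict String String),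
      runB monkeys f st d = some r → runB monkeys (f + m) st d = some r := by
  induction f with
  | zero => intro st d r h; simp [runB] at h
  | succ f ih =>
    intro st d r h
    rw [show f + 1 + m = (f + m) + 1 from by omega]
    cases st with
    | nil => simpa [runB] using h
    | cons top rest =>
      obtain ⟨name, ready⟩ := top
      simp only [runB] at h ⊢
      split at h
      · rename_i hr
        rw [if_pos hr]
        split at h
        · cases h
        · split at h
          · rename_i m1 op m2 hs
            split at h
            · exact ih _ _ _ h
            · cases h
          · cases h
      · rename_i hr
        rw [if_neg hr]
        split at h
        · rename_i hn; rw [if_pos hn]; exact ih _ _ _ h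
        · rename_i hn; rw [if_neg hn]
          split at h
          · cases h
          · split at h
            · exact ih _ _ _ h
            · exact ih _ _ _ h
            · cases h

def Consistent (monkeys : List (String × String)) (d : PySem.Dict String String) : Prop :=
  ∀ k v, d.get? k = some v → ∃ n, evalA monkeys n k = some v

theorem consistent_insert (monkeys : List (String × String)) (d : PySem.Dict String String)
    (k0 v0 : String) (hd : Consistent monkeys d) (h0 : ∃ n, evalA monkeys n k0 = some v0) :
    Consistent monkeys (d.insert k0 v0) := by
  intro k v hv
  rw [PySem.Dict.get?_insert] at hv
  by_cases hk : k = k0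
  · simp [hk] at hv; subst hk; rw [← hv]; exact h0
  · simp [hk] at hv; exact hd k v hv

theorem runB_main (monkeys : List (String × String)) (fa : Nat) :
    ∀ (name s : String), evalA monkeys fa name = some s →
      ∀ (d : PySem.Dict String String), Consistent monkeys d →
        ∃ (fneed : Nat) (d' : PySem.Dict String String),
          fneed + 1 ≤ 2 * 3 ^ fa ∧
          (∀ (fb : Nat) (rest : List (String × Bool)),
            runB monkeys (fneed + fb) ((name, false) :: rest) d = runB monkeys fb rest d') ∧
          Consistent monkeys d' ∧ d'.get? name = some s ∧
          (∀ k, (d.get? k).isSome → (d'.get? k).isSome) := by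
  induction fa with
  | zero => intro name s h; simp [evalA] at h
  | succ fa ih =>
    intro name s h d hd
    have hpow : 1 ≤ 3 ^ fa := Nat.one_le_pow _ _ (by norm_num)
    have hpow' : 2 * 3 ^ (fa + 1) = 6 * 3 ^ fa := by ring
    simp only [evalA] at h
    split at h
    · -- name = "humn"
      rename_i hn
      obtain rfl : "x" = s := Option.some_inj.mp h
      refine ⟨1, d.insert name "x", by omega, ?_, ?_, ?_, ?_⟩
      · intro fb rest
        rw [show 1 + fb = fb + 1 from by omega]
        simp [runB, hn]
      · exact consistent_insert monkeys d name "x" hd ⟨1, by simp [evalA, hn]⟩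
      · exact PySem.Dict.get?_insert_self d name "x"
      · intro k hk
        rw [PySem.Dict.get?_insert]
        split
        · simp
        · exact hk
    · rename_i hn
      split at h
      · cases h
      · rename_i v hget
        split at h
        · -- single token
          rename_i value hs
          obtain rfl : value = s := Option.some_inj.mp h
          refine ⟨1, d.insert name value, by omega, ?_, ?_, ?_, ?_⟩
          · intro fb rest
            rw [show 1 + fb = fb + 1 from by omega]
            simp [runB, hn, hget, hs]
          · exact consistent_insert monkeys d name value hd
              ⟨1, by simp only [evalA, if_neg hn, hget, hs]⟩
          · exact PySem.Dict.get?_insert_self d name value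
          · intro k hk
            rw [PySem.Dict.get?_insert]
            split
            · simp
            · exact hk
        · -- three tokens
          rename_i m1 op m2 hs
          split at h
          · rename_i l r h1 h2
            obtain rfl : "(" ++ l ++ " " ++ op ++ " " ++ r ++ ")" = s := Option.some_inj.mp h
            obtain ⟨f1, d1, hb1, hrun1, hc1, hval1, hpres1⟩ := ih m1 l h1 d hd
            obtain ⟨f2, d2, hb2, hrun2, hc2, hval2, hpres2⟩ := ih m2 r h2 d1 hc1
            -- d2 still maps m1 to l
            have hm1 : d2.get? m1 = some l := by
              have hsome : (d2.get? m1).isSome := hpres2 m1 (by rw [hval1]; rfl)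
              obtain ⟨w, hw⟩ := Option.isSome_iff_exists.mp hsome
              obtain ⟨nw, hnw⟩ := hc2 m1 w hw
              rw [hw, evalA_det monkeys hnw h1]
            refine ⟨f1 + f2 + 2,
              d2.insert name ("(" ++ l ++ " " ++ op ++ " " ++ r ++ ")"),
              by omega, ?_, ?_, ?_, ?_⟩
            · intro fb rest
              rw [show f1 + f2 + 2 + fb = (f1 + (f2 + (1 + fb))) + 1 from by omega]
              have step1 :
                  runB monkeys ((f1 + (f2 + (1 + fb))) + 1) ((name, false) :: rest) d =
                    runB monkeys (f1 + (f2 + (1 + fb)))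
                      ((m1, false) :: (m2, false) :: (name, true) :: rest) d := by
                simp [runB, hn, hget, hs]
              rw [step1, hrun1, hrun2, show 1 + fb = fb + 1 from by omega]
              simp [runB, hget, hs, hm1, hval2]
            · refine consistent_insert monkeys d2 name _ hc2 ⟨fa + 1, ?_⟩
              simp only [evalA, if_neg hn, hget, hs, h1, h2]
            · exact PySem.Dict.get?_insert_self d2 _ _
            · intro k hk
              rw [PySem.Dict.get?_insert]
              split
              · simp
              · exact hpres2 k (hpres1 k hk)
          · cases h
        · cases h

theorem get_equation_spec : Claim_equal_get_equation := by
  intro monkeys monkey _hdom hpre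
  unfold Spec_get_equation
  obtain ⟨s, hs⟩ := wellFormedUpTo_evalA monkeys (monkeys.length + 1) monkey hpre
  obtain ⟨fneed, d', hb, hrun, _hc, hval, _⟩ :=
    runB_main monkeys (monkeys.length + 1) monkey s hs PySem.Dict.empty
      (by intro k v hkv; rw [PySem.Dict.get?_empty] at hkv; cases hkv)
  have h1 : runB monkeys (fneed + 1) [(monkey, false)] PySem.Dict.empty = some d' := by
    rw [hrun 1 []]; rfl
  have hpow : 3 ^ (monkeys.length + 1) ≤ 3 ^ (monkeys.length + 2) :=
    Nat.pow_le_pow_right (by norm_num) (by omega)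
  have hle : fneed + 1 ≤ 2 * 3 ^ (monkeys.length + 2) + 1 := by omega
  have h2 : runB monkeys (2 * 3 ^ (monkeys.length + 2) + 1) [(monkey, false)] PySem.Dict.empty
      = some d' := by
    rw [show 2 * 3 ^ (monkeys.length + 2) + 1 = (fneed + 1) + (2 * 3 ^ (monkeys.length + 2) + 1 - (fneed + 1)) from by omega]
    exact runB_mono monkeys (fneed + 1) _ _ _ _ h1
  unfold get_equation get_equation_alt
  rw [hs, h2]
  dsimp only
  rw [hval]
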